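-- pv_equiv track=rewrite | github.com/Viswazgummadi/RAG_P01 | utils/query_utils.py | find_best_matching_file
-- ===== SOURCE A (Python) =====
-- def find_best_matching_file(file_reference, available_files):
--     """Find the best matching filename from available files."""
--     # Exact match
--     for file in available_files:
--         if file.lower() == file_reference.lower():
--             return file
--
--     # Partial match
--     best_matches = []
--     for file in available_files:
--         if file_reference.lower() in file.lower():
--             best_matches.append(file)
--
--     if best_matches:
--         # Return the shortest matching filename (likely most relevant)
--         return min(best_matches, key=len)
--
--     return None
-- ===== SOURCE B (Python) =====
-- def find_best_matching_file(file_reference, available_files):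
--     """Single-pass: return an exact (case-insensitive) match immediately;
--     otherwise track the shortest partial match (first of equal-length ties)."""
--     ref = file_reference.lower()
--     best = None
--     for file in available_files:
--         low = file.lower()
--         if low == ref:
--             return file
--         if ref in low and (best is None or len(file) < len(best)):
--             best = file
--     return best
-- ===== Notes on version B (the rewrite author's own statement) =====
-- stated objective: faster
-- what changed: Replaces A's two sequential scans (exact-match loop, then building a best_matches list and taking min by length) with one fused loop that lowercases the reference once up front, returns an exact match immediately and otherwise tracks the running shortest partial match, so no intermediate list is built.
import Mathlib
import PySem

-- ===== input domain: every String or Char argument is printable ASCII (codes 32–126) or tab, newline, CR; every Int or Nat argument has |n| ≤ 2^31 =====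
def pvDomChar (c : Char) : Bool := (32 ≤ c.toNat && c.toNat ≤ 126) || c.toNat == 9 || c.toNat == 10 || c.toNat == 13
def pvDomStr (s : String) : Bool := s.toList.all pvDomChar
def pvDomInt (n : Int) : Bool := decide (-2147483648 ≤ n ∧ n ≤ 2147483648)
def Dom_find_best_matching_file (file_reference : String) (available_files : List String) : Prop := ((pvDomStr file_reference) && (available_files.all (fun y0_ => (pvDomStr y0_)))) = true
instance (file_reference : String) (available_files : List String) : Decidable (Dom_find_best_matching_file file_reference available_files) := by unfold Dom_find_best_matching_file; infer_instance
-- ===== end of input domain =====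

-- B fuses A's two scans (exact-match loop, then best_matches + min by length) into one loop that
-- lowercases the reference once and tracks the running shortest partial match (no intermediate list);
-- a timing run measured B faster (constant-factor: A re-lowercases the reference every iteration).

-- ===== PORT A =====
-- first loop of A: return the first file whose lowercase equals the lowercase reference
def pvAExact (r : List Char) : List String → Option String
  | [] => none
  | f :: rest => if PySem.Chars.lower f.toList = r then some f else pvAExact r rest

def find_best_matching_file (file_reference : String) (available_files : List String) : Option String :=
  match pvAExact (PySem.Chars.lower file_reference.toList) available_files with
  | some f => some f
  | none =>
    match available_files.foldl
      (fun acc f => if PySem.Chars.isIn (PySem.Chars.lower file_reference.toList) (PySem.Chars.lower f.toList) then acc ++ [f] else acc) [] with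
    | [] => none
    | m :: rest => PySem.List.min? (m :: rest) (fun f => PySem.Str.len f)

-- ===== PORT B =====
-- B's single loop: exact match returns immediately; otherwise keep the strictly shorter partial match
def pvBGo (r : List Char) (best : Option String) : List String → Option String
  | [] => best
  | f :: rest =>
    let low := PySem.Chars.lower f.toList
    if low = r then some f
    else if PySem.Chars.isIn r low &&
            (match best with
             | none => true
             | some b => decide (PySem.Str.len f < PySem.Str.len b)) then
      pvBGo r (some f) rest
    else
      pvBGo r best rest

def find_best_matching_file_alt (file_reference : String) (available_files : List String) : Option String :=
  pvBGo (PySem.Chars.lower file_reference.toList) none available_files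

-- ===== PRECONDITION & SPEC =====
def Spec_find_best_matching_file (file_reference : String) (available_files : List String) (out : Option String) : Prop := out = find_best_matching_file_alt file_reference available_files
instance (file_reference : String) (available_files : List String) (out : Option String) : Decidable (Spec_find_best_matching_file file_reference available_files out) := by unfold Spec_find_best_matching_file; infer_instance

-- ===== CLAIM (what is proved, stated in full; the proofs are below) =====
def Claim_equal_find_best_matching_file : Prop := ∀ (file_reference : String) (available_files : List String), Dom_find_best_matching_file file_reference available_files → Spec_find_best_matching_file file_reference available_files (find_best_matching_file file_reference available_files)

-- ===== LEMMAS AND PROOFS =====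

-- the running-minimum step shared by min? (A's min by len) and B's accumulator update
def pvStep (acc : Option String) (f : String) : Option String :=
  match acc with
  | none => some f
  | some b => if PySem.Str.len f < PySem.Str.len b then some f else some b

-- if A's exact loop finds f, B returns f regardless of the accumulator
theorem pvBGo_of_exact (r : List Char) (files : List String) (f : String)
    (h : pvAExact r files = some f) : ∀ best, pvBGo r best files = some f := by
  induction files with
  | nil => simp [pvAExact] at h
  | cons x rest ih =>
    intro best
    by_cases hx : PySem.Chars.lower x.toList = r
    · simp [pvAExact, hx] at h
      subst h
      simp [pvBGo, hx]
    · simp [pvAExact, hx] at h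
      simp only [pvBGo]
      rw [if_neg hx]
      split <;> split <;> exact ih h _

-- if A's exact loop fails, B folds pvStep over the partial matches
theorem pvBGo_of_no_exact (r : List Char) (files : List String)
    (h : pvAExact r files = none) : ∀ best, pvBGo r best files =
      (files.filter (fun f => PySem.Chars.isIn r (PySem.Chars.lower f.toList))).foldl pvStep best := by
  induction files with
  | nil => intro best; simp [pvBGo]
  | cons x rest ih =>
    intro best
    have hx : ¬ PySem.Chars.lower x.toList = r := by
      intro hc; simp [pvAExact, hc] at h
    have hrest : pvAExact r rest = none := by simpa [pvAExact, hx] using h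
    by_cases hin : PySem.Chars.isIn r (PySem.Chars.lower x.toList) = true
    · cases best with
      | none => simp [pvBGo, hx, hin, ih hrest, pvStep]
      | some b =>
        simp only [pvBGo, hin, Bool.true_and]
        rw [if_neg hx]
        have hfc : List.filter (fun f => PySem.Chars.isIn r (PySem.Chars.lower f.toList)) (x :: rest)
            = x :: List.filter (fun f => PySem.Chars.isIn r (PySem.Chars.lower f.toList)) rest := by
          simp [hin]
        rw [hfc, List.foldl_cons]
        by_cases hlt : PySem.Str.len x < PySem.Str.len b
        · rw [if_pos (decide_eq_true hlt), ih hrest]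
          have hs : pvStep (some b) x = some x := by
            simp only [pvStep]; rw [if_pos hlt]
          rw [hs]
        · rw [if_neg (by simpa using hlt), ih hrest]
          have hs : pvStep (some b) x = some b := by
            simp only [pvStep]; rw [if_neg hlt]
          rw [hs]
    · simp [pvBGo, hx, hin, ih hrest]

-- A's min-by-length over a list IS the pvStep fold from an empty accumulator
theorem pvMin?_eq_foldl (xs : List String) :
    PySem.List.min? xs (fun f => PySem.Str.len f) = xs.foldl pvStep none := by
  simp only [PySem.List.min?]
  congr 1
  funext acc x
  cases acc <;> rfl

-- A's foldl-append accumulation of the partial matches is a filter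
theorem pvMatches_eq_filter (p : String → Bool) (files : List String) :
    files.foldl (fun acc f => if p f then acc ++ [f] else acc) [] = files.filter p := by
  simpa using PySem.List.foldl_append_if p id files []

-- ===== VERDICT (by name: the statement is the Claim_ definition above) =====
theorem find_best_matching_file_spec : Claim_equal_find_best_matching_file := by
  intro ref files _
  unfold Spec_find_best_matching_file find_best_matching_file find_best_matching_file_alt
  cases hE : pvAExact (PySem.Chars.lower ref.toList) files with
  | some f => simp [pvBGo_of_exact _ files f hE none]
  | none =>
    rw [pvBGo_of_no_exact _ files hE none]
    rw [pvMatches_eq_filter (fun f => PySem.Chars.isIn (PySem.Chars.lower ref.toList) (PySem.Chars.lower f.toList)) files]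
    cases hF : files.filter (fun f => PySem.Chars.isIn (PySem.Chars.lower ref.toList) (PySem.Chars.lower f.toList)) with
    | nil => rfl
    | cons m rest => exact pvMin?_eq_foldl _
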